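-- pv_equiv track=rewrite | github.com/HPDL-Group/Merak | Merak/core/pipeline/module_utils.py | partition_uniform
-- ===== SOURCE A (Python) =====
-- from math import ceil, floor
-- from typing import List, Union
--
-- def partition_uniform(num_items: int, num_parts: int, use_ceil: bool = True) -> List[int]:
--     parts = [0] * (num_parts + 1)
--     # First check for the trivial edge case
--     if num_items <= num_parts:
--         for p in range(num_parts + 1):
--             parts[p] = min(p, num_items)
--         return parts
--
--     if use_ceil:
--         chunksize = ceil(num_items / num_parts)
--     else:
--         chunksize = floor(num_items / num_parts)
--     for p in range(num_parts):
--         parts[p] = min(chunksize * p, num_items)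
--
--     remainder = num_items % num_parts
--     for p in range(num_parts):
--         for i in range(remainder):
--             if p > 1 + i:
--                 parts[p] += 1
--
--     parts[num_parts] = num_items
--     return parts
-- ===== SOURCE B (Python) =====
-- def partition_uniform(num_items: int, num_parts: int, use_ceil: bool = True):
--     # Trivial edge case: fewer items than parts -> 0,1,...,num_items then constant
--     if num_items <= num_parts:
--         k = max(0, num_items)
--         return list(range(k)) + [num_items] * (num_parts + 1 - k)
--     # Integer ceil/floor division (exact: no float round-trip)
--     chunksize = -(-num_items // num_parts) if use_ceil else num_items // num_parts
--     remainder = num_items % num_parts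
--     # Closed form replaces A's O(num_parts * remainder) double loop:
--     # index p receives +1 once per i in range(remainder) with i < p - 1,
--     # i.e. exactly min(remainder, max(0, p - 1)) increments.
--     return [min(chunksize * p, num_items) + min(remainder, max(0, p - 1))
--             for p in range(num_parts)] + [num_items]
-- ===== Notes on version B (the rewrite author's own statement) =====
-- stated objective: faster
-- what changed: A's quadratic double loop that increments each boundary once per remainder unit is replaced by the closed form min(remainder, max(0, p-1)), and the float ceil/floor round-trip by exact integer division, building the list in one comprehension.
import Mathlib
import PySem

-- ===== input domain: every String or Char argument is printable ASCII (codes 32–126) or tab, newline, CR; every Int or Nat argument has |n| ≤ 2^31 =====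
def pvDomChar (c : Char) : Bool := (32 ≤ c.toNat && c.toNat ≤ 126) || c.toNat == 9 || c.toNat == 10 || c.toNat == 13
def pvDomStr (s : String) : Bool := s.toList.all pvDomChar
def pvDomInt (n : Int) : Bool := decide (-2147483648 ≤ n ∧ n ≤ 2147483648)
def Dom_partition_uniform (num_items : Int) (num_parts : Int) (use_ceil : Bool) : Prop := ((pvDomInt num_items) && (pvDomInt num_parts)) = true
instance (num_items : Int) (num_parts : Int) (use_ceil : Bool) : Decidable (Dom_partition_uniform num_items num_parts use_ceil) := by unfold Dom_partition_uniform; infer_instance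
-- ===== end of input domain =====

-- B replaces A's O(num_parts * remainder) double increment loop by the closed form
-- min(remainder, max(0, p-1)) and the float ceil/floor by exact integer division (objective: faster).

-- ===== PORT A =====
-- Python's ceil(num_items / num_parts) / floor(...) go through a float quotient; on the
-- stated domain (|num_items| ≤ 2^31, 1 ≤ num_parts ≤ 2^31) the float rounding error of the
-- quotient is smaller than 1/num_parts, so ceil/floor of the float equal the exact integer
-- ceiling division -((-num_items) // num_parts) resp. floor division num_items // num_parts,
-- which is how this port expresses them.
def partition_uniform (num_items : Int) (num_parts : Int) (use_ceil : Bool) : List Int :=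
  let parts := PySem.List.pyRepeat [(0 : Int)] (num_parts + 1)   -- [0] * (num_parts + 1)
  if num_items ≤ num_parts then
    -- for p in range(num_parts + 1): parts[p] = min(p, num_items)
    (PySem.List.pyRange 0 (num_parts + 1)).foldl
      (fun parts p => PySem.List.pySetD parts p (min p num_items)) parts
  else
    let chunksize : Int :=
      if use_ceil then -(PySem.Int.floordiv (-num_items) num_parts)
      else PySem.Int.floordiv num_items num_parts
    -- for p in range(num_parts): parts[p] = min(chunksize * p, num_items)
    let parts :=
      (PySem.List.pyRange 0 num_parts).foldl
        (fun parts p => PySem.List.pySetD parts p (min (chunksize * p) num_items)) parts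
    let remainder := PySem.Int.mod num_items num_parts
    -- for p in range(num_parts): for i in range(remainder): if p > 1 + i: parts[p] += 1
    let parts :=
      (PySem.List.pyRange 0 num_parts).foldl
        (fun parts p =>
          (PySem.List.pyRange 0 remainder).foldl
            (fun parts i =>
              if 1 + i < p then
                PySem.List.pySetD parts p (PySem.List.pyGetD parts p 0 + 1)
              else parts) parts) parts
    PySem.List.pySetD parts num_parts num_items

-- ===== PORT B =====
def partition_uniform_alt (num_items : Int) (num_parts : Int) (use_ceil : Bool) : List Int :=
  if num_items ≤ num_parts then
    -- list(range(k)) + [num_items] * (num_parts + 1 - k) with k = max 0 num_items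
    PySem.List.pyRange 0 (max 0 num_items)
      ++ PySem.List.pyRepeat [num_items] (num_parts + 1 - max 0 num_items)
  else
    let chunksize : Int :=
      if use_ceil then -(PySem.Int.floordiv (-num_items) num_parts)
      else PySem.Int.floordiv num_items num_parts
    let remainder := PySem.Int.mod num_items num_parts
    ((PySem.List.pyRange 0 num_parts).map
        (fun p => min (chunksize * p) num_items + min remainder (max 0 (p - 1))))
      ++ [num_items]

-- ===== PRECONDITION & SPEC =====
-- Pre_ excludes exactly the inputs where A raises: when num_parts ≤ 0 and num_items > num_parts,
-- A hits ZeroDivisionError (num_parts = 0) or IndexError at parts[num_parts] (num_parts < 0).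
def Pre_partition_uniform (num_items : Int) (num_parts : Int) (use_ceil : Bool) : Prop :=
  num_items ≤ num_parts ∨ 1 ≤ num_parts
instance (num_items : Int) (num_parts : Int) (use_ceil : Bool) : Decidable (Pre_partition_uniform num_items num_parts use_ceil) := by unfold Pre_partition_uniform; infer_instance
def pvWitness_partition_uniform : Int × Int × Bool := (10, 3, true)

def Spec_partition_uniform (num_items : Int) (num_parts : Int) (use_ceil : Bool) (out : List Int) : Prop := out = partition_uniform_alt num_items num_parts use_ceil
instance (num_items : Int) (num_parts : Int) (use_ceil : Bool) (out : List Int) : Decidable (Spec_partition_uniform num_items num_parts use_ceil out) := by unfold Spec_partition_uniform; infer_instance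

-- ===== CLAIM (what is proved, stated in full; the proofs are below) =====
def Claim_equal_partition_uniform : Prop := ∀ (num_items : Int) (num_parts : Int) (use_ceil : Bool), Dom_partition_uniform num_items num_parts use_ceil → Pre_partition_uniform num_items num_parts use_ceil → Spec_partition_uniform num_items num_parts use_ceil (partition_uniform num_items num_parts use_ceil)

-- ===== LEMMAS AND PROOFS =====

-- A write-only index loop 'for p in range(m): xs[p] = f(p)' rewrites the first m cells.
theorem pv_foldl_set_range (f : Int → Int) (m : Nat) (init : List Int) (h : m ≤ init.length) :
    (PySem.List.pyRange 0 (m : Int)).foldl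
      (fun xs p => PySem.List.pySetD xs p (f p)) init
    = (List.range m).map (fun k : Nat => f (k : Int)) ++ init.drop m := by
  induction m with
  | zero => simp [PySem.List.pyRange_one_eq_nil]
  | succ m ih =>
    have hlt : m < init.length := by omega
    rw [show ((m + 1 : Nat) : Int) = (m : Int) + 1 by push_cast; ring,
        PySem.List.pyRange_one_succ_right (by positivity),
        List.foldl_append, ih (by omega)]
    simp only [List.foldl_cons, List.foldl_nil, PySem.List.pySetD_natCast]
    rw [List.set_append]
    simp only [List.length_map, List.length_range, lt_irrefl, if_false, Nat.sub_self]
    rw [List.range_succ, List.map_append, List.drop_eq_getElem_cons hlt,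
        List.set_cons_zero]
    simp

-- The inner loop 'for i in range(r): if p > 1 + i: parts[p] += 1' adds the number of
-- qualifying i's to cell p.
theorem pv_incr_fold (l : List Int) (xs : List Int) (p : Nat) (hp : p < xs.length) :
    l.foldl
      (fun ys i =>
        if 1 + i < (p : Int) then
          PySem.List.pySetD ys (p : Int) (PySem.List.pyGetD ys (p : Int) 0 + 1)
        else ys) xs
    = xs.set p (xs.getD p 0 + (l.countP (fun i => decide (1 + i < (p : Int))) : Int)) := by
  induction l generalizing xs with
  | nil =>
    simp only [List.foldl_nil, List.countP_nil, Nat.cast_zero, add_zero,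
      List.getD_eq_getElem _ _ hp]
    rw [List.set_getElem_self]
  | cons i l ih =>
    simp only [List.foldl_cons, List.countP_cons]
    by_cases hc : 1 + i < (p : Int)
    · have hp' : p < (xs.set p (xs.getD p 0 + 1)).length := by simpa using hp
      rw [if_pos hc, PySem.List.pySetD_natCast, PySem.List.pyGetD_natCast,
          ih _ hp', List.getD_eq_getElem _ _ hp', List.getElem_set_self, List.set_set,
          List.getD_eq_getElem _ _ hp]
      simp only [hc, decide_true, if_true]
      push_cast
      ring_nf
    · rw [if_neg hc, ih _ hp]
      simp [hc]

-- Count of k in range(n) with 1 + k < q, as an Int.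
theorem pv_count_range_nat (n : Nat) (q : Int) :
    (((List.range n).map (fun k : Nat => (k : Int))).countP
        (fun i => decide (1 + i < q)) : Int)
    = min (n : Int) (max 0 (q - 1)) := by
  induction n with
  | zero => simp
  | succ n ih =>
    rw [List.range_succ, List.map_append, List.countP_append]
    simp only [List.map_cons, List.map_nil, List.countP_cons, List.countP_nil]
    by_cases hc : 1 + (n : Int) < q
    · simp only [hc, decide_true, if_true, Nat.zero_add]
      push_cast
      rw [ih]
      omega
    · simp only [hc, decide_false, Bool.false_eq_true, if_false, Nat.add_zero]
      push_cast
      rw [ih]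
      omega

-- Count of i in range(0, r) with i < q - 1 is the clamped remainder.
theorem pv_count_range (r q : Int) :
    ((PySem.List.pyRange 0 r).countP (fun i => decide (1 + i < q)) : Int)
    = min (max 0 r) (max 0 (q - 1)) := by
  rw [PySem.List.pyRange_zero, pv_count_range_nat]
  omega

-- The outer loop of A's double loop adds the clamped remainder to each of the first M cells.
theorem pv_foldl_incr_range (r : Int) (M : Nat) (init : List Int) (h : M ≤ init.length) :
    (PySem.List.pyRange 0 (M : Int)).foldl
      (fun xs p =>
        (PySem.List.pyRange 0 r).foldl
          (fun ys i =>
            if 1 + i < p then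
              PySem.List.pySetD ys p (PySem.List.pyGetD ys p 0 + 1)
            else ys) xs) init
    = (List.range M).map
        (fun k : Nat => init.getD k 0 + min (max 0 r) (max 0 ((k : Int) - 1)))
      ++ init.drop M := by
  induction M with
  | zero => simp [PySem.List.pyRange_one_eq_nil]
  | succ M ih =>
    have hlt : M < init.length := by omega
    rw [show ((M + 1 : Nat) : Int) = (M : Int) + 1 by push_cast; ring,
        PySem.List.pyRange_one_succ_right (by positivity),
        List.foldl_append, ih (by omega)]
    simp only [List.foldl_cons, List.foldl_nil]
    set L := (List.range M).map
        (fun k : Nat => init.getD k 0 + min (max 0 r) (max 0 ((k : Int) - 1)))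
      ++ init.drop M with hL
    have hlen : M < L.length := by
      simp [hL]
      omega
    rw [pv_incr_fold _ L M hlen, pv_count_range]
    have hgetD : L.getD M 0 = init.getD M 0 := by
      rw [hL, List.getD_append_right _ _ _ _ (by simp)]
      simp only [List.length_map, List.length_range, Nat.sub_self]
      rw [List.drop_eq_getElem_cons hlt]
      simp
    rw [hgetD, hL, List.set_append]
    simp only [List.length_map, List.length_range, lt_irrefl, if_false, Nat.sub_self]
    rw [List.range_succ, List.map_append, List.drop_eq_getElem_cons hlt,
        List.set_cons_zero]
    simp

-- getD of a prefix built by map over range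
theorem pv_getD_map_range_append (f : Nat → Int) (M k : Nat) (t : List Int) (hk : k < M) :
    ((List.range M).map f ++ t).getD k 0 = f k := by
  rw [List.getD_append _ _ _ _ (by simpa using hk), List.getD_eq_getElem _ _ (by simpa using hk)]
  simp

theorem partition_uniform_spec : Claim_equal_partition_uniform := by
  intro n m c hdom hpre
  unfold Spec_partition_uniform partition_uniform partition_uniform_alt
  by_cases hnm : n ≤ m
  · simp only [if_pos hnm]
    by_cases hm : 0 ≤ m + 1
    · obtain ⟨M, hM⟩ : ∃ M : Nat, m + 1 = (M : Int) := ⟨(m + 1).toNat, by omega⟩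
      obtain ⟨K, hK⟩ : ∃ K : Nat, max 0 n = (K : Int) := ⟨n.toNat, by omega⟩
      have hKM : K ≤ M := by omega
      rw [hM, PySem.List.pyRepeat_singleton,
          show ((M : Int)).toNat = M from Int.toNat_natCast M,
          pv_foldl_set_range (fun p => min p n) M _ (by simp),
          hK, PySem.List.pyRepeat_singleton,
          show ((M : Int) - (K : Int)).toNat = M - K from by omega,
          PySem.List.pyRange_zero_nat,
          show M = K + (M - K) from by omega, List.range_add,
          List.map_append, List.map_map]
      simp only [List.drop_replicate, Nat.sub_self, List.replicate_zero, List.append_nil]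
      congr 1
      · refine List.map_congr_left (fun k hk => ?_)
        have hk' := List.mem_range.mp hk
        omega
      · have hfun : ∀ j ∈ List.range (M - K),
            ((fun k : Nat => min ((k : Nat) : Int) n) ∘ fun x => K + x) j = n := by
          intro j hj
          simp only [Function.comp_apply]
          push_cast
          omega
        rw [List.map_congr_left hfun, List.map_const']
        simp
    · simp only [PySem.List.pyRange_one_eq_nil (show m + 1 ≤ 0 by omega),
        PySem.List.pyRange_one_eq_nil (show max 0 n ≤ 0 by omega)]
      simp [PySem.List.pyRepeat_singleton, show (m + 1).toNat = 0 from by omega,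
        show (m + 1 - max 0 n).toNat = 0 from by omega]
  · have hm1 : 1 ≤ m := by rcases hpre with h | h <;> omega
    simp only [if_neg hnm]
    obtain ⟨M, hM⟩ : ∃ M : Nat, m = (M : Int) := ⟨m.toNat, by omega⟩
    have hr : 0 ≤ PySem.Int.mod n m := PySem.Int.mod_nonneg n (by omega)
    rw [hM, PySem.List.pyRepeat_singleton,
        show ((M : Int) + 1).toNat = M + 1 from by omega,
        pv_foldl_set_range _ M _ (by simp),
        List.drop_replicate,
        show M + 1 - M = 1 from by omega]
    rw [pv_foldl_incr_range _ M _ (by simp),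
        PySem.List.pySetD_natCast, List.set_append]
    simp only [List.length_map, List.length_range, lt_irrefl, if_false, Nat.sub_self]
    rw [List.drop_left' (by simp), PySem.List.pyRange_zero_nat, List.map_map]
    have hr' : max 0 (PySem.Int.mod n (M : Int)) = PySem.Int.mod n (M : Int) :=
      max_eq_right (by rw [← hM]; exact hr)
    congr 1
    · refine List.map_congr_left (fun k hk => ?_)
      rw [pv_getD_map_range_append _ _ _ _ (List.mem_range.mp hk), hr']
      simp [Function.comp]
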